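-- pv_equiv track=rewrite | github.com/pypi-data/pypi-mirror-358 | packages/mlx-textgen/mlx_textgen-0.2.1.tar.gz/mlx_textgen-0.2.1/src/mlx_textgen/model_utils.py | find_conseq_indices_pairs
-- ===== SOURCE A (Python) =====
-- from typing import TYPE_CHECKING, Dict, Any, Optional, Literal, Type, List, Union, Tuple, Iterator
--
-- def find_conseq_indices_pairs(input_list: List[int], batch_size: int) -> List[Tuple[Tuple[int, int], bool]]:
--     if not input_list:
--         return []
--
--     output = []
--     i = 0
--     n = len(input_list)
--
--     while i < n:
--         start_index = i
--         current_value = input_list[i]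
--
--         if current_value == 0:
--             j = i
--             while j < n and input_list[j] == 0:
--                 j += 1
--                 if (j - i) == batch_size:
--                     output.append(((i, j), False))
--                     i = j
--                     start_index = i
--             if i < j:
--                 output.append(((start_index, j), False))
--                 i = j
--         else:
--             j = i
--             while j < n and input_list[j] != 0:
--                 j += 1
--             output.append(((i, j), True))
--             i = j
--
--     return output
-- ===== SOURCE B (Python) =====
-- from itertools import groupby
--
--
-- def find_conseq_indices_pairs(input_list, batch_size):
--     output = []
--     pos = 0
--     for is_zero, grp in groupby(input_list, key=lambda x: x == 0):
--         end = pos + sum(1 for _ in grp)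
--         if not is_zero:
--             output.append(((pos, end), True))
--         elif batch_size <= 0:
--             # non-positive batch size means no batching: whole zero run as one pair
--             output.append(((pos, end), False))
--         else:
--             for k in range(pos, end, batch_size):
--                 output.append(((k, min(k + batch_size, end)), False))
--         pos = end
--     return output
-- ===== Notes on version B (the rewrite author's own statement) =====
-- stated objective: simpler
-- what changed: Replaces A's single index-juggling while loop (with an in-loop chunk counter and start_index resets) by a two-phase groupby decomposition: first materialise maximal zero/non-zero runs with itertools.groupby, then emit one pair per non-zero run and batch_size-sized sub-ranges per zero run (whole run when batch_size <= 0, matching A's never-splitting there).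
import Mathlib
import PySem

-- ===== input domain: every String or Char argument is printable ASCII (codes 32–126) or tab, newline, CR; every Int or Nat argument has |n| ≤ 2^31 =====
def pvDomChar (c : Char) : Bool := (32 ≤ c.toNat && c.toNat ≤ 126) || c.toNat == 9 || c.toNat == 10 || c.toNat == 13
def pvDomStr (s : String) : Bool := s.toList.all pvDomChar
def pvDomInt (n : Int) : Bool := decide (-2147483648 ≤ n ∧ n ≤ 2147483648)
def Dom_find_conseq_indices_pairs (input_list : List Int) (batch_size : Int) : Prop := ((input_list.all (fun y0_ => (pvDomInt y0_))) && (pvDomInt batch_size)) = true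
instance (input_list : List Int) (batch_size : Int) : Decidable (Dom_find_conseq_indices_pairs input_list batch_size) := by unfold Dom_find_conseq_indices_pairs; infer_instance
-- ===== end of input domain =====

-- B replaces A's single index-juggling while loop by a groupby-style decomposition
-- (maximal zero/non-zero runs first, then chunking of zero runs); objective: simpler, not faster.

-- ===== PORT A =====
-- inner `while j < n and input_list[j] == 0` loop (state: j, i, start_index, output)
def pvAZeroLoop (xs : List Int) (bs : Int) (j i start : Nat)
    (out : List ((Int × Int) × Bool)) : Nat × Nat × Nat × List ((Int × Int) × Bool) :=
  if h : j < xs.length ∧ xs.getD j 0 = 0 then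
    -- j += 1 (written inline as j + 1 below)
    if (((j + 1 : Nat) : Int) - (i : Int)) = bs then
      pvAZeroLoop xs bs (j + 1) (j + 1) (j + 1) (out ++ [(((i : Int), ((j + 1 : Nat) : Int)), false)])
    else
      pvAZeroLoop xs bs (j + 1) i start out
  else (j, i, start, out)
termination_by xs.length - j
decreasing_by all_goals (obtain ⟨h1, _⟩ := h; omega)

-- inner `while j < n and input_list[j] != 0` loop
def pvANonzeroLoop (xs : List Int) (j : Nat) : Nat :=
  if h : j < xs.length ∧ xs.getD j 0 ≠ 0 then pvANonzeroLoop xs (j + 1) else j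
termination_by xs.length - j
decreasing_by obtain ⟨h1, _⟩ := h; omega

-- outer `while i < n` loop; i strictly increases, so fuel = n suffices
def pvALoop (xs : List Int) (bs : Int) (fuel : Nat) (i : Nat)
    (out : List ((Int × Int) × Bool)) : List ((Int × Int) × Bool) :=
  match fuel with
  | 0 => out
  | fuel + 1 =>
    if i < xs.length then
      if xs.getD i 0 = 0 then
        let r := pvAZeroLoop xs bs i i i out
        if r.2.1 < r.1 then
          pvALoop xs bs fuel r.1 (r.2.2.2 ++ [(((r.2.2.1 : Int), (r.1 : Int)), false)])
        else
          pvALoop xs bs fuel r.2.1 r.2.2.2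
      else
        let j := pvANonzeroLoop xs i
        pvALoop xs bs fuel j (out ++ [(((i : Int), (j : Int)), true)])
    else out

def find_conseq_indices_pairs (input_list : List Int) (batch_size : Int) :
    List ((Int × Int) × Bool) :=
  if input_list = [] then []
  else pvALoop input_list batch_size input_list.length 0 []

-- ===== PORT B =====
-- length of the maximal prefix whose key (x == 0) equals b (groupby run length)
def pvRunLen (b : Bool) : List Int → Nat
  | [] => 0
  | x :: rest => if (x == 0) = b then pvRunLen b rest + 1 else 0

theorem pvRunLen_head_pos (x : Int) (rest : List Int) :
    0 < pvRunLen (x == 0) (x :: rest) := by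
  simp [pvRunLen]

-- itertools.groupby over the key (x == 0): list of (key, run length)
def pvBGroups : List Int → List (Bool × Nat)
  | [] => []
  | x :: rest =>
    (x == 0, pvRunLen (x == 0) (x :: rest)) ::
      pvBGroups ((x :: rest).drop (pvRunLen (x == 0) (x :: rest)))
termination_by l => l.length
decreasing_by
  have := pvRunLen_head_pos x rest
  simp only [List.length_drop]
  simp only [List.length_cons]
  omega

-- `for k in range(pos, end, batch_size): append ((k, min(k+batch_size, end)), False)`
def pvZChunks (e bs k : Int) : List ((Int × Int) × Bool) :=
  if h : 0 < bs ∧ k < e then ((k, min (k + bs) e), false) :: pvZChunks e bs (k + bs)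
  else []
termination_by (e - k).toNat
decreasing_by obtain ⟨h1, h2⟩ := h; omega

-- the for-loop over groups, carrying the running position
def pvBMain (bs : Int) (pos : Int) : List (Bool × Nat) → List ((Int × Int) × Bool)
  | [] => []
  | (isz, len) :: rest =>
    (if isz = false then [((pos, pos + (len : Int)), true)]
     else if bs ≤ 0 then [((pos, pos + (len : Int)), false)]
     else pvZChunks (pos + (len : Int)) bs pos) ++ pvBMain bs (pos + (len : Int)) rest

def find_conseq_indices_pairs_alt (input_list : List Int) (batch_size : Int) :
    List ((Int × Int) × Bool) :=
  pvBMain batch_size 0 (pvBGroups input_list)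

-- ===== PRECONDITION & SPEC =====
def Spec_find_conseq_indices_pairs (input_list : List Int) (batch_size : Int) (out : List ((Int × Int) × Bool)) : Prop := out = find_conseq_indices_pairs_alt input_list batch_size
instance (input_list : List Int) (batch_size : Int) (out : List ((Int × Int) × Bool)) : Decidable (Spec_find_conseq_indices_pairs input_list batch_size out) := by unfold Spec_find_conseq_indices_pairs; infer_instance

-- ===== CLAIM (what is proved, stated in full; the proofs are below) =====
def Claim_equal_find_conseq_indices_pairs : Prop := ∀ (input_list : List Int) (batch_size : Int), Dom_find_conseq_indices_pairs input_list batch_size → Spec_find_conseq_indices_pairs input_list batch_size (find_conseq_indices_pairs input_list batch_size)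

-- ===== LEMMAS AND PROOFS =====

-- A's post-processing of the zero inner loop: append the partial tail if i < j
def pvFinishZ (r : Nat × Nat × Nat × List ((Int × Int) × Bool)) :
    Nat × List ((Int × Int) × Bool) :=
  (r.1, if r.2.1 < r.1 then r.2.2.2 ++ [(((r.2.2.1 : Int), (r.1 : Int)), false)] else r.2.2.2)

theorem pvFinishZ_base (bs : Int) (hbs : 0 < bs) (j i : Nat) (out : List ((Int × Int) × Bool))
    (hij : i ≤ j) (hlt : ((j : Int) - (i : Int)) < bs) :
    pvFinishZ (j, i, i, out) = (j, out ++ pvZChunks (j : Int) bs (i : Int)) := by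
  unfold pvFinishZ
  by_cases hij2 : i < j
  · have hijI : (i : Int) < (j : Int) := by exact_mod_cast hij2
    rw [pvZChunks, dif_pos ⟨hbs, hijI⟩]
    have hmin : min ((i : Int) + bs) (j : Int) = (j : Int) := by omega
    rw [hmin, pvZChunks, dif_neg (show ¬ (0 < bs ∧ (i : Int) + bs < (j : Int)) by omega)]
    simp [hij2]
  · have hij3 : i = j := by omega
    subst hij3
    rw [pvZChunks, dif_neg (show ¬ (0 < bs ∧ (i : Int) < (i : Int)) by omega)]
    simp

theorem pvRunLen_nil_of_le (b : Bool) (xs : List Int) (j : Nat) (h : xs.length ≤ j) :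
    pvRunLen b (xs.drop j) = 0 := by
  simp [List.drop_eq_nil_of_le h, pvRunLen]

theorem pvANonzeroLoop_eq (xs : List Int) :
    ∀ m j, xs.length - j ≤ m → pvANonzeroLoop xs j = j + pvRunLen false (xs.drop j) := by
  intro m
  induction m with
  | zero =>
    intro j hj
    have hlen : xs.length ≤ j := by omega
    have hc : ¬ (j < xs.length ∧ xs.getD j 0 ≠ 0) := by
      intro hc; omega
    rw [pvANonzeroLoop, dif_neg hc, pvRunLen_nil_of_le false xs j hlen]
    omega
  | succ m ih =>
    intro j hj
    by_cases hjn : j < xs.length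
    · have hd : xs.drop j = xs[j] :: xs.drop (j + 1) := List.drop_eq_getElem_cons hjn
      have hget : xs.getD j 0 = xs[j] := List.getD_eq_getElem xs 0 hjn
      by_cases hz : xs[j] = 0
      · have hc : ¬ (j < xs.length ∧ xs.getD j 0 ≠ 0) := by
          rw [hget]; simp [hz]
        rw [pvANonzeroLoop, dif_neg hc, hd]
        simp [pvRunLen, hz]
      · have hc : j < xs.length ∧ xs.getD j 0 ≠ 0 := ⟨hjn, by rw [hget]; exact hz⟩
        rw [pvANonzeroLoop, dif_pos hc, ih (j + 1) (by omega), hd]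
        simp only [pvRunLen]
        simp [hz]
        omega
    · have hlen : xs.length ≤ j := by omega
      have hc : ¬ (j < xs.length ∧ xs.getD j 0 ≠ 0) := by
        intro hc; omega
      rw [pvANonzeroLoop, dif_neg hc, pvRunLen_nil_of_le false xs j hlen]
      omega

theorem pvAZeroLoop_nosplit (xs : List Int) (bs : Int) (hbs : bs ≤ 0) :
    ∀ m j i st out, xs.length - j ≤ m → i ≤ j →
      pvAZeroLoop xs bs j i st out = (j + pvRunLen true (xs.drop j), i, st, out) := by
  intro m
  induction m with
  | zero =>
    intro j i st out hj hij
    have hlen : xs.length ≤ j := by omega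
    have hc : ¬ (j < xs.length ∧ xs.getD j 0 = 0) := by
      intro hc; omega
    rw [pvAZeroLoop, dif_neg hc, pvRunLen_nil_of_le true xs j hlen]
    simp
  | succ m ih =>
    intro j i st out hj hij
    by_cases hjn : j < xs.length
    · have hd : xs.drop j = xs[j] :: xs.drop (j + 1) := List.drop_eq_getElem_cons hjn
      have hget : xs.getD j 0 = xs[j] := List.getD_eq_getElem xs 0 hjn
      by_cases hz : xs[j] = 0
      · have hc : j < xs.length ∧ xs.getD j 0 = 0 := ⟨hjn, by rw [hget]; exact hz⟩
        have hne : ¬ (((j + 1 : Nat) : Int) - (i : Int) = bs) := by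
          have : (i : Int) ≤ (j : Int) := by exact_mod_cast hij
          push_cast
          omega
        rw [pvAZeroLoop, dif_pos hc, if_neg hne, ih (j + 1) i st out (by omega) (by omega), hd]
        simp only [pvRunLen]
        simp [hz]
        omega
      · have hc : ¬ (j < xs.length ∧ xs.getD j 0 = 0) := by
          rw [hget]; intro hc; exact hz hc.2
        rw [pvAZeroLoop, dif_neg hc, hd]
        simp [pvRunLen, hz]
    · have hlen : xs.length ≤ j := by omega
      have hc : ¬ (j < xs.length ∧ xs.getD j 0 = 0) := by
        intro hc; omega
      rw [pvAZeroLoop, dif_neg hc, pvRunLen_nil_of_le true xs j hlen]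
      simp

theorem pvAZeroLoop_i_le (xs : List Int) (bs : Int) :
    ∀ m j i st out, xs.length - j ≤ m → i ≤ j →
      (pvAZeroLoop xs bs j i st out).2.1 ≤ (pvAZeroLoop xs bs j i st out).1 := by
  intro m
  induction m with
  | zero =>
    intro j i st out hj hij
    have hc : ¬ (j < xs.length ∧ xs.getD j 0 = 0) := by
      intro hc; omega
    rw [pvAZeroLoop, dif_neg hc]
    exact hij
  | succ m ih =>
    intro j i st out hj hij
    by_cases hc : j < xs.length ∧ xs.getD j 0 = 0
    · rw [pvAZeroLoop, dif_pos hc]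
      by_cases hr : (((j + 1 : Nat) : Int) - (i : Int)) = bs
      · rw [if_pos hr]
        exact ih (j + 1) (j + 1) (j + 1) _ (by omega) (le_refl _)
      · rw [if_neg hr]
        exact ih (j + 1) i st out (by omega) (by omega)
    · rw [pvAZeroLoop, dif_neg hc]
      exact hij

-- the key lemma: the zero inner loop plus A's tail-append produce exactly B's chunk list
theorem pvAZeroLoop_split (xs : List Int) (bs : Int) (hbs : 0 < bs) :
    ∀ m j i out, xs.length - j ≤ m → i ≤ j → ((j : Int) - (i : Int)) < bs →
      pvFinishZ (pvAZeroLoop xs bs j i i out) =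
        (j + pvRunLen true (xs.drop j),
         out ++ pvZChunks (((j + pvRunLen true (xs.drop j) : Nat) : Int)) bs (i : Int)) := by
  intro m
  induction m with
  | zero =>
    intro j i out hj hij hlt
    have hlen : xs.length ≤ j := by omega
    have hc : ¬ (j < xs.length ∧ xs.getD j 0 = 0) := by
      intro hc; omega
    rw [pvAZeroLoop, dif_neg hc, pvRunLen_nil_of_le true xs j hlen]
    simp only [Nat.add_zero]
    exact pvFinishZ_base bs hbs j i out hij hlt
  | succ m ih =>
    intro j i out hj hij hlt
    by_cases hjn : j < xs.length
    · have hd : xs.drop j = xs[j] :: xs.drop (j + 1) := List.drop_eq_getElem_cons hjn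
      have hget : xs.getD j 0 = xs[j] := List.getD_eq_getElem xs 0 hjn
      by_cases hz : xs[j] = 0
      · have hc : j < xs.length ∧ xs.getD j 0 = 0 := ⟨hjn, by rw [hget]; exact hz⟩
        have hrl : pvRunLen true (xs.drop j) = pvRunLen true (xs.drop (j + 1)) + 1 := by
          rw [hd]; simp [pvRunLen, hz]
        have he : (j + 1) + pvRunLen true (xs.drop (j + 1)) = j + pvRunLen true (xs.drop j) := by
          omega
        by_cases hr : (((j + 1 : Nat) : Int) - (i : Int)) = bs
        · rw [pvAZeroLoop, dif_pos hc, if_pos hr,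
            ih (j + 1) (j + 1) (out ++ [(((i : Int), ((j + 1 : Nat) : Int)), false)])
              (by omega) (le_refl _) (by push_cast; omega), he]
          have hie : (i : Int) < ((j + pvRunLen true (xs.drop j) : Nat) : Int) := by
            have : (i : Int) ≤ (j : Int) := by exact_mod_cast hij
            push_cast
            omega
          conv_rhs => rw [pvZChunks, dif_pos ⟨hbs, hie⟩]
          have hmin : min ((i : Int) + bs) ((j + pvRunLen true (xs.drop j) : Nat) : Int)
              = ((j + 1 : Nat) : Int) := by
            push_cast at hr ⊢
            omega
          have hik : (i : Int) + bs = ((j + 1 : Nat) : Int) := by push_cast at hr ⊢; omega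
          rw [hmin, hik]
          simp
        · rw [pvAZeroLoop, dif_pos hc, if_neg hr,
            ih (j + 1) i out (by omega) (by omega) (by push_cast at hr ⊢; omega), he]
      · have hc : ¬ (j < xs.length ∧ xs.getD j 0 = 0) := by
          rw [hget]; intro hc; exact hz hc.2
        have hr0 : pvRunLen true (xs.drop j) = 0 := by
          rw [hd]; simp [pvRunLen, hz]
        rw [pvAZeroLoop, dif_neg hc, hr0]
        simp only [Nat.add_zero]
        exact pvFinishZ_base bs hbs j i out hij hlt
    · have hlen : xs.length ≤ j := by omega
      have hc : ¬ (j < xs.length ∧ xs.getD j 0 = 0) := by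
        intro hc; omega
      rw [pvAZeroLoop, dif_neg hc, pvRunLen_nil_of_le true xs j hlen]
      simp only [Nat.add_zero]
      exact pvFinishZ_base bs hbs j i out hij hlt

theorem pvBGroups_cons (x : Int) (rest : List Int) :
    pvBGroups (x :: rest) =
      (x == 0, pvRunLen (x == 0) (x :: rest)) ::
        pvBGroups ((x :: rest).drop (pvRunLen (x == 0) (x :: rest))) := by
  rw [pvBGroups]

theorem pvALoop_eq (xs : List Int) (bs : Int) :
    ∀ fuel i out, xs.length - i ≤ fuel →
      pvALoop xs bs fuel i out = out ++ pvBMain bs (i : Int) (pvBGroups (xs.drop i)) := by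
  intro fuel
  induction fuel with
  | zero =>
    intro i out hi
    have hlen : xs.length ≤ i := by omega
    simp [pvALoop, List.drop_eq_nil_of_le hlen, pvBGroups, pvBMain]
  | succ fuel ih =>
    intro i out hi
    by_cases hin : i < xs.length
    · have hd : xs.drop i = xs[i] :: xs.drop (i + 1) := List.drop_eq_getElem_cons hin
      have hget : xs.getD i 0 = xs[i] := List.getD_eq_getElem xs 0 hin
      have hdd : ∀ L, (xs.drop i).drop L = xs.drop (i + L) := by
        intro L; rw [List.drop_drop]
      by_cases hz : xs[i] = 0
      · -- zero-run branch of A vs the is_zero group of B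
        have hb : (xs[i] == 0) = true := by simp [hz]
        set L := pvRunLen true (xs.drop i) with hLdef
        have hL1 : 0 < L := by
          rw [hLdef, hd]; simp [pvRunLen, hz]
        have hgroups : pvBGroups (xs.drop i) =
            (true, L) :: pvBGroups (xs.drop (i + L)) := by
          rw [hd, pvBGroups_cons, hb, ← hd, ← hLdef, hdd]
        have hgz : xs.getD i 0 = 0 := by rw [hget]; exact hz
        rw [pvALoop]
        rw [if_pos hin, if_pos hgz]
        by_cases hbs : 0 < bs
        · have hsplit := pvAZeroLoop_split xs bs hbs (xs.length - i) i i out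
            (by omega) (le_refl _) (by omega)
          set r := pvAZeroLoop xs bs i i i out with hrdef
          have hr1 : r.1 = i + L := by
            have := congrArg Prod.fst hsplit
            simpa [pvFinishZ, hLdef] using this
          have hile : r.2.1 ≤ r.1 :=
            pvAZeroLoop_i_le xs bs (xs.length - i) i i i out (by omega) (le_refl _)
          have hr2 := congrArg Prod.snd hsplit
          simp only [pvFinishZ] at hr2
          by_cases hlt : r.2.1 < r.1
          · simp only [hlt, if_true] at hr2 ⊢
            rw [ih r.1 _ (by omega), hr2, hr1, hgroups]
            simp only [pvBMain, Bool.true_eq_false, if_false, if_neg (by omega : ¬ bs ≤ 0)]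
            rw [List.append_assoc]
            congr 2
          · have hieq : r.2.1 = r.1 := le_antisymm hile (Nat.le_of_not_lt hlt)
            simp only [hlt, if_false] at hr2 ⊢
            rw [hieq, ih r.1 _ (by omega), hr2, hr1, hgroups]
            simp only [pvBMain, Bool.true_eq_false, if_false, if_neg (by omega : ¬ bs ≤ 0)]
            rw [List.append_assoc]
            congr 2
        · -- bs ≤ 0: the (j-i)==batch_size check never fires in A, no splitting in B
          have hns := pvAZeroLoop_nosplit xs bs (by omega) (xs.length - i) i i i out
            (by omega) (le_refl _)
          rw [hns]
          simp only [← hLdef]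
          have hlt : i < i + L := by omega
          simp only [hlt, if_true]
          rw [ih (i + L) _ (by omega), hgroups]
          simp only [pvBMain, Bool.true_eq_false, if_false, if_pos (by omega : bs ≤ 0)]
          rw [List.append_assoc]
          congr 2
      · -- non-zero-run branch of A vs the not-is_zero group of B
        have hb : (xs[i] == 0) = false := by simp [hz]
        set L := pvRunLen false (xs.drop i) with hLdef
        have hL1 : 0 < L := by
          rw [hLdef, hd]; simp [pvRunLen, hz]
        have hgroups : pvBGroups (xs.drop i) =
            (false, L) :: pvBGroups (xs.drop (i + L)) := by
          rw [hd, pvBGroups_cons, hb, ← hd, ← hLdef, hdd]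
        have hgz : ¬ xs.getD i 0 = 0 := by rw [hget]; exact hz
        rw [pvALoop]
        rw [if_pos hin, if_neg hgz]
        have hnz : pvANonzeroLoop xs i = i + L :=
          pvANonzeroLoop_eq xs (xs.length - i) i (by omega)
        simp only [hnz]
        rw [ih (i + L) _ (by omega), hgroups]
        simp only [pvBMain]
        rw [List.append_assoc]
        congr 2
    · have hlen : xs.length ≤ i := by omega
      rw [pvALoop, if_neg hin]
      simp [List.drop_eq_nil_of_le hlen, pvBGroups, pvBMain]

-- ===== VERDICT (by name: the statement is the Claim_ definition above) =====
theorem find_conseq_indices_pairs_spec : Claim_equal_find_conseq_indices_pairs := by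
  intro xs bs _
  unfold Spec_find_conseq_indices_pairs find_conseq_indices_pairs find_conseq_indices_pairs_alt
  by_cases he : xs = []
  · simp [he, pvBGroups, pvBMain]
  · rw [if_neg he, pvALoop_eq xs bs xs.length 0 [] (by omega)]
    simp
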